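-- pv_equiv track=rewrite | github.com/Leewonchan14/CodingTest | 프로그래머스/0/181918. 배열 만들기 4/배열 만들기 4.py | solution
-- ===== SOURCE A (Python) =====
-- def solution(arr):
--     stk = []
--     i = 0
--     while i < len(arr):
--         if len(stk) == 0:
--             stk.append(arr[i])
--             i += 1
--             continue
--
--         elif stk[-1] < arr[i]:
--             stk.append(arr[i])
--             i += 1
--             continue
--         else :
--             stk.pop()
--
--     return stk
-- ===== SOURCE B (Python) =====
-- def solution(arr):
--     # right-to-left scan keeping a running strict minimum; no stack
--     res = []
--     m = None
--     for x in reversed(arr):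
--         if m is None or x < m:
--             res.append(x)
--             m = x
--     return res[::-1]
-- ===== Notes on version B (the rewrite author's own statement) =====
-- stated objective: simpler
-- what changed: Replaces the push/pop stack loop by a single right-to-left scan that keeps only a scalar running minimum and collects the strict suffix minima.
import Mathlib
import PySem

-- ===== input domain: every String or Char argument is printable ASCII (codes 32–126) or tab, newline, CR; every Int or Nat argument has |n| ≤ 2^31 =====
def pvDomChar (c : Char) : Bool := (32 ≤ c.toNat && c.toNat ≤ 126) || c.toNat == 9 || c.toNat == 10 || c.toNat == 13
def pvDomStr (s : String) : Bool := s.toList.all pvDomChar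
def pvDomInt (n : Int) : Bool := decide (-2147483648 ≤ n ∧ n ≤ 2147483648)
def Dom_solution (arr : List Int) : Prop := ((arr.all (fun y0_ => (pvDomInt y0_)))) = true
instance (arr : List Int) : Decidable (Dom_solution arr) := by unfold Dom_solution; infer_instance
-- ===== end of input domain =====

-- B replaces A's push/pop stack by a single right-to-left scan with a scalar running
-- minimum (objective: simpler); A=B proved on all inputs.


-- ===== PORT A =====
-- stack kept head-as-top (append = cons, stk[-1] = head, pop = tail); reversed at return
-- to restore Python's bottom-to-top order.
def solutionLoop (stk : List Int) (rest : List Int) : List Int :=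
  match rest with
  | [] => stk
  | a :: r =>
    match stk with
    | [] => solutionLoop [a] r                      -- len(stk)==0: push, i += 1
    | t :: s =>
      if t < a then solutionLoop (a :: t :: s) r    -- stk[-1] < arr[i]: push, i += 1
      else solutionLoop s (a :: r)                  -- else: pop (i unchanged)
termination_by stk.length + 2 * rest.length
decreasing_by all_goals simp_all <;> omega

def solution (arr : List Int) : List Int := (solutionLoop [] arr).reverse

-- ===== PORT B =====
-- fold over reversed arr; state = (running minimum m, collected minima res with last
-- appended at head, i.e. Python's res reversed, so res[::-1] is the state itself).
def solutionAltStep (p : Option Int × List Int) (x : Int) : Option Int × List Int :=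
  match p.1 with
  | none => (some x, x :: p.2)
  | some m => if x < m then (some x, x :: p.2) else p

def solution_alt (arr : List Int) : List Int :=
  (arr.reverse.foldl solutionAltStep (none, [])).2

-- ===== PRECONDITION & SPEC =====
def Spec_solution (arr : List Int) (out : List Int) : Prop := out = solution_alt arr
instance (arr : List Int) (out : List Int) : Decidable (Spec_solution arr out) := by unfold Spec_solution; infer_instance

-- ===== CLAIM (what is proved, stated in full; the proofs are below) =====
def Claim_equal_solution : Prop := ∀ (arr : List Int), Dom_solution arr → Spec_solution arr (solution arr)

-- ===== LEMMAS AND PROOFS =====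

-- one step of A's outer loop on stacks: pop while top ≥ a, then push a
def stepA (stk : List Int) (a : Int) : List Int :=
  a :: stk.dropWhile (fun t => decide (a ≤ t))

-- B's accumulated state after consuming a list (right-to-left over the original array)
def altP (arr : List Int) : Option Int × List Int :=
  arr.reverse.foldl solutionAltStep (none, [])

theorem altP_nil : altP [] = (none, []) := rfl

theorem altP_cons (a : Int) (r : List Int) :
    altP (a :: r) = solutionAltStep (altP r) a := by
  simp [altP, List.reverse_cons, List.foldl_append]

theorem altP_fst (arr : List Int) : (altP arr).1 = (altP arr).2.head? := by
  induction arr with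
  | nil => rfl
  | cons a r ih =>
    rw [altP_cons]
    unfold solutionAltStep
    rcases h : (altP r).1 with _ | m
    · simp
    · by_cases hx : a < (m : Int)
      · simp [hx]
      · simpa [hx] using ih

-- the pop loop is dropWhile
theorem loop_pop (stk : List Int) (a : Int) (r : List Int) :
    solutionLoop stk (a :: r) = solutionLoop (stepA stk a) r := by
  induction stk with
  | nil => simp [stepA, solutionLoop]
  | cons t s ih =>
    by_cases h : t < a
    · rw [solutionLoop]
      simp [h, stepA, List.dropWhile, not_le.mpr h]
    · rw [solutionLoop]
      simp only [h, if_false]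
      rw [ih]
      simp [stepA, List.dropWhile, not_lt.mp h]

theorem loop_foldl (rest stk : List Int) :
    solutionLoop stk rest = rest.foldl stepA stk := by
  induction rest generalizing stk with
  | nil => rw [solutionLoop]; rfl
  | cons a r ih => rw [loop_pop, ih]; rfl

theorem dropWhile_dropWhile {p q : Int → Bool} (xs : List Int)
    (h : ∀ t, q t = true → p t = true) :
    List.dropWhile p (List.dropWhile q xs) = List.dropWhile p xs := by
  induction xs with
  | nil => rfl
  | cons x xs ih =>
    by_cases hq : q x = true
    · rw [List.dropWhile_cons_of_pos hq, List.dropWhile_cons_of_pos (h x hq), ih]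
    · rw [List.dropWhile_cons_of_neg hq]

theorem main_lemma (rest stk : List Int) :
    rest.foldl stepA stk =
      (altP rest).2.reverse ++
        (match (altP rest).2.head? with
         | none => stk
         | some m => stk.dropWhile (fun t => decide (m ≤ t))) := by
  induction rest generalizing stk with
  | nil => simp [altP_nil]
  | cons a r ih =>
    rw [List.foldl_cons, ih (stepA stk a), altP_cons]
    have hfst := altP_fst r
    unfold solutionAltStep
    rcases h2 : (altP r).2 with _ | ⟨m, l⟩
    · -- r contributes nothing: altP r = (none, [])
      rw [hfst, h2]
      simp [stepA]
    · rw [hfst, h2]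
      simp only [List.head?_cons]
      by_cases hx : a < m
      · -- a is a new strict minimum: it stays on the stack
        simp only [hx, if_true]
        simp [stepA, not_le.mpr hx, List.append_assoc]
      · -- a ≥ m: a gets popped later; dropping ≥ m absorbs the step
        simp only [hx, if_false, h2, List.head?_cons]
        have hma : decide ((m:Int) ≤ a) = true := by simpa using not_lt.mp hx
        have hd : List.dropWhile (fun t => decide ((m:Int) ≤ t)) (stepA stk a) =
            List.dropWhile (fun t => decide ((m:Int) ≤ t)) stk := by
          simp only [stepA, List.dropWhile, hma]
          exact dropWhile_dropWhile stk (fun t ht => by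
            simp at ht ⊢; exact le_trans (not_lt.mp hx) ht)
        rw [hd]

-- ===== VERDICT (by name: the statement is the Claim_ definition above) =====
theorem solution_spec : Claim_equal_solution := by
  intro arr _
  unfold Spec_solution solution solution_alt
  rw [loop_foldl, main_lemma]
  have hfst := altP_fst arr
  rcases h2 : (altP arr).2 with _ | ⟨m, l⟩
  · simp [altP] at h2 ⊢; simp [h2]
  · simp only [List.head?_cons, List.dropWhile_nil, List.append_nil, List.reverse_reverse]
    simp [altP] at h2 ⊢; simp [h2]
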